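-- pv_equiv track=rewrite | github.com/acauchyf/chess-coach-agentic | chess_coach/infrastructure/lichess_client.py | _split_pgn_games
-- ===== SOURCE A (Python) =====
-- from typing import List, Optional
--
-- def _split_pgn_games(pgn_text: str) -> List[str]:
--     chunks: List[str] = []
--     current: List[str] = []
--
--     for line in pgn_text.splitlines():
--         if line.startswith("[Event ") and current:
--             chunks.append("\n".join(current).strip())
--             current = [line]
--         else:
--             current.append(line)
--
--     if current:
--         last = "\n".join(current).strip()
--         if last:
--             chunks.append(last)
--
--     return chunks
-- ===== SOURCE B (Python) =====
-- def _span_non_event(rest):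
--     """Split rest into (lines before the first '[Event ' line, the remainder)."""
--     for i, line in enumerate(rest):
--         if line.startswith("[Event "):
--             return rest[:i], rest[i:]
--     return rest, []
--
--
-- def _split_pgn_games(pgn_text):
--     lines = pgn_text.splitlines()
--     if not lines:
--         return []
--     out = []
--     first, rest = lines[0], lines[1:]
--     while True:
--         pre, post = _span_non_event(rest)
--         chunk = "\n".join([first] + pre).strip()
--         if not post:
--             if chunk:
--                 out.append(chunk)
--             return out
--         out.append(chunk)
--         first, rest = post[0], post[1:]
-- ===== Notes on version B (the rewrite author's own statement) =====
-- stated objective: alternative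
-- what changed: Replaces A's line-by-line state machine (chunks, current buffer) with a group-wise decomposition: repeatedly span off the lines up to the next '[Event ' boundary, render each group with join/strip, filtering only the final group when it strips empty.
import Mathlib
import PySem

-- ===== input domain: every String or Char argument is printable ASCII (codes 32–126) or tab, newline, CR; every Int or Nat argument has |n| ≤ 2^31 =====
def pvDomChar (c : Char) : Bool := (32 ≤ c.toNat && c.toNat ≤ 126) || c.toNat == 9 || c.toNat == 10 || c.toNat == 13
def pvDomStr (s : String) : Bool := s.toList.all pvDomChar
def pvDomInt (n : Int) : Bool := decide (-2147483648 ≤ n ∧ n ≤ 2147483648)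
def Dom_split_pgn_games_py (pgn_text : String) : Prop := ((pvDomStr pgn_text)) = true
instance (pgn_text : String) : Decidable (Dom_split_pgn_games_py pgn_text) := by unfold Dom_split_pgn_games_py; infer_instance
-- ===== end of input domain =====

-- B replaces A's line-by-line state machine with a group-wise span/render decomposition; same results, same cost.

-- shared small helpers: line.startswith("[Event ") and "\n".join(cur).strip()
def pvIsEvent (line : String) : Bool := PySem.Str.startswith line "[Event "
def pvJoinStrip (cur : List String) : String := PySem.Str.strip (PySem.Str.join "\n" cur)

-- ===== PORT A =====
-- loop body of A over state (chunks, current)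
def pvStepA (st : List String × List String) (line : String) : List String × List String :=
  if pvIsEvent line && !st.2.isEmpty then
    (st.1 ++ [pvJoinStrip st.2], [line])
  else
    (st.1, st.2 ++ [line])

-- A's code after the loop
def pvFinishA (st : List String × List String) : List String :=
  if !st.2.isEmpty then
    let last := pvJoinStrip st.2
    if last ≠ "" then st.1 ++ [last] else st.1
  else st.1

def split_pgn_games_py (pgn_text : String) : List String :=
  pvFinishA ((PySem.Str.splitlines pgn_text).foldl pvStepA ([], []))

-- ===== PORT B =====
-- _span_non_event: lines before the first '[Event ' line, and the remainder
def pvSpanNonEvent : List String → List String × List String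
  | [] => ([], [])
  | l :: ls =>
    if pvIsEvent l then ([], l :: ls)
    else
      let r := pvSpanNonEvent ls
      (l :: r.1, r.2)

theorem pvSpanNonEvent_snd_len (ls : List String) : (pvSpanNonEvent ls).2.length ≤ ls.length := by
  induction ls with
  | nil => simp [pvSpanNonEvent]
  | cons l ls ih =>
    simp only [pvSpanNonEvent]
    split
    · simp
    · simpa using Nat.le_succ_of_le ih

-- B's while-loop, tail-recursive on the remaining lines
def pvGamesLoop (out : List String) (first : String) (rest : List String) : List String :=
  match h : pvSpanNonEvent rest with
  | (pre, []) =>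
      let chunk := pvJoinStrip (first :: pre)
      if chunk ≠ "" then out ++ [chunk] else out
  | (pre, p :: ps) =>
      pvGamesLoop (out ++ [pvJoinStrip (first :: pre)]) p ps
termination_by rest.length
decreasing_by
  have hlen := pvSpanNonEvent_snd_len rest
  rw [h] at hlen
  simp at hlen
  omega

def split_pgn_games_py_alt (pgn_text : String) : List String :=
  match PySem.Str.splitlines pgn_text with
  | [] => []
  | l :: ls => pvGamesLoop [] l ls

-- ===== PRECONDITION & SPEC =====
def Spec_split_pgn_games_py (pgn_text : String) (out : List String) : Prop := out = split_pgn_games_py_alt pgn_text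
instance (pgn_text : String) (out : List String) : Decidable (Spec_split_pgn_games_py pgn_text out) := by unfold Spec_split_pgn_games_py; infer_instance

-- ===== CLAIM (what is proved, stated in full; the proofs are below) =====
def Claim_equal_split_pgn_games_py : Prop := ∀ (pgn_text : String), Dom_split_pgn_games_py pgn_text → Spec_split_pgn_games_py pgn_text (split_pgn_games_py pgn_text)

-- ===== LEMMAS AND PROOFS =====

-- proof-side helper: the games produced from current buffer `cur` and remaining lines
def pvGamesCur (out cur : List String) : List String → List String
  | [] => if pvJoinStrip cur ≠ "" then out ++ [pvJoinStrip cur] else out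
  | l :: ls =>
    if pvIsEvent l then pvGamesCur (out ++ [pvJoinStrip cur]) [l] ls
    else pvGamesCur out (cur ++ [l]) ls

theorem pvSpan_head_event (rest : List String) (pre : List String) (p : String) (ps : List String)
    (h : pvSpanNonEvent rest = (pre, p :: ps)) : pvIsEvent p = true := by
  induction rest generalizing pre with
  | nil => simp [pvSpanNonEvent] at h
  | cons l ls ih =>
    simp only [pvSpanNonEvent] at h
    split at h
    · rename_i hb
      injection h with h1 h2
      injection h2 with h3 _
      subst h3; exact hb
    · injection h with h1 h2
      exact ih (pvSpanNonEvent ls).1 (by rw [← h2])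

theorem pvGamesCur_span (rest : List String) : ∀ (out cur pre post : List String),
    pvSpanNonEvent rest = (pre, post) →
    pvGamesCur out cur rest = pvGamesCur out (cur ++ pre) post := by
  induction rest with
  | nil =>
    intro out cur pre post h
    simp [pvSpanNonEvent] at h
    obtain ⟨rfl, rfl⟩ := h
    simp
  | cons l ls ih =>
    intro out cur pre post h
    simp only [pvSpanNonEvent] at h
    split at h
    · rename_i hb
      injection h with h1 h2
      subst h1; subst h2
      simp
    · rename_i hb
      injection h with h1 h2
      subst h1; subst h2
      have hbf : pvIsEvent l = false := by simpa using hb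
      rw [show pvGamesCur out cur (l :: ls) = pvGamesCur out (cur ++ [l]) ls by
            simp [pvGamesCur, hbf]]
      rw [ih out (cur ++ [l]) (pvSpanNonEvent ls).1 (pvSpanNonEvent ls).2 rfl]
      simp

theorem pvGamesLoop_eq_cur (out : List String) (first : String) (rest : List String) :
    pvGamesLoop out first rest = pvGamesCur out [first] rest := by
  fun_induction pvGamesLoop out first rest with
  | case1 out first rest pre h chunk hch =>
    rw [pvGamesCur_span rest out [first] pre [] h]
    simp only [pvGamesCur, List.cons_append, List.nil_append]
    rw [if_pos (by simpa using hch)]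
  | case2 out first rest pre h chunk hch =>
    rw [pvGamesCur_span rest out [first] pre [] h]
    simp only [pvGamesCur, List.cons_append, List.nil_append]
    rw [if_neg (by simpa using hch)]
  | case3 out first rest pre p ps h ih =>
    rw [pvGamesCur_span rest out [first] pre (p :: ps) h]
    have hp : pvIsEvent p = true := pvSpan_head_event rest pre p ps h
    rw [show pvGamesCur out ([first] ++ pre) (p :: ps)
          = pvGamesCur (out ++ [pvJoinStrip ([first] ++ pre)]) [p] ps by
        simp [pvGamesCur, hp]]
    simpa using ih

theorem pvMain (rest : List String) : ∀ (out cur : List String), cur ≠ [] →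
    pvFinishA (rest.foldl pvStepA (out, cur)) = pvGamesCur out cur rest := by
  induction rest with
  | nil =>
    intro out cur hcur
    have hne : cur.isEmpty = false := by simpa [List.isEmpty_iff] using hcur
    simp [pvFinishA, hne, pvGamesCur]
  | cons l ls ih =>
    intro out cur hcur
    have hne : cur.isEmpty = false := by simpa [List.isEmpty_iff] using hcur
    by_cases hb : pvIsEvent l = true
    · have hstep : pvStepA (out, cur) l = (out ++ [pvJoinStrip cur], [l]) := by
        simp [pvStepA, hb, hne]
      rw [List.foldl_cons, hstep, ih _ _ (by simp)]
      simp [pvGamesCur, hb]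
    · have hbf : pvIsEvent l = false := by simpa using hb
      have hstep : pvStepA (out, cur) l = (out, cur ++ [l]) := by
        simp [pvStepA, hbf]
      rw [List.foldl_cons, hstep, ih _ _ (by simp)]
      simp [pvGamesCur, hbf]

-- ===== VERDICT (by name: the statement is the Claim_ definition above) =====
theorem split_pgn_games_py_spec : Claim_equal_split_pgn_games_py := by
  intro pgn_text _
  unfold Spec_split_pgn_games_py split_pgn_games_py split_pgn_games_py_alt
  cases h : PySem.Str.splitlines pgn_text with
  | nil => simp [pvFinishA]
  | cons l ls =>
    show pvFinishA (List.foldl pvStepA ([], []) (l :: ls)) = pvGamesLoop [] l ls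
    rw [pvGamesLoop_eq_cur]
    have h1 : pvStepA ([], []) l = ([], [l]) := by simp [pvStepA]
    simp only [List.foldl_cons, h1]
    exact pvMain ls [] [l] (by simp)
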